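-- pv_equiv track=rewrite | github.com/JinmoKIM1012/2019_UGRP | src/functionsToFind.py | get_name_only
-- ===== SOURCE A (Python) =====
-- def get_name_only(input_nouns):
--     try:
--         new_nouns = []
--
--         # 길이 1 또는 4이상 요소 삭제
--         for i in input_nouns:
--             now_length = len(i)
--             if not (now_length == 1 or now_length >= 4):
--                 new_nouns.append(i)
--
--         # 이름 결정
--         found_name = new_nouns[0]
--
--         for i in new_nouns:
--             if len(i) > len(found_name):
--                 found_name = i
--         return found_name
--     except:
--         return None
-- ===== SOURCE B (Python) =====
-- def get_name_only(input_nouns):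
--     try:
--         # kept lengths are only 0, 2 or 3, so the first maximum-length kept
--         # element is: the first len-3 element, else the first len-2, else
--         # the first len-0 element.
--         first2 = None
--         first0 = None
--         for s in input_nouns:
--             n = len(s)
--             if n == 3:
--                 return s
--             if n == 2 and first2 is None:
--                 first2 = s
--             if n == 0 and first0 is None:
--                 first0 = s
--         if first2 is not None:
--             return first2
--         return first0
--     except:
--         return None
-- ===== Notes on version B (the rewrite author's own statement) =====
-- stated objective: faster
-- what changed: Replaces A's two passes (filter into an intermediate list, then fold for the first maximum) by one short-circuiting pass exploiting that kept lengths are only 0, 2 or 3: return the first length-3 element immediately, else remember the first length-2 and the first length-0 element.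
import Mathlib
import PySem

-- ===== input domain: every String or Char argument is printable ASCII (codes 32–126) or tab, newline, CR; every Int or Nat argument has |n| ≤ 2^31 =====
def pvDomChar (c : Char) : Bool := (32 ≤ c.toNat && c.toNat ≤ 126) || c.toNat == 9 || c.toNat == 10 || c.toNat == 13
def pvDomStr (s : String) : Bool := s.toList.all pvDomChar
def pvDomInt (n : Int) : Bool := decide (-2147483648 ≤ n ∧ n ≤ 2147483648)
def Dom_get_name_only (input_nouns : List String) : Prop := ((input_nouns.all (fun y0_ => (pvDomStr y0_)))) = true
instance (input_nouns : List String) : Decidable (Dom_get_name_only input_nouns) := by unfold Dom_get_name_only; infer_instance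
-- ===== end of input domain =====

-- B replaces A's two passes (filter, then first-maximum fold) by one short-circuiting pass
-- exploiting that kept lengths are only 0, 2 or 3 (objective: simpler).

-- ===== PORT A =====
def get_name_only (input_nouns : List String) : Option String :=
  let new_nouns := input_nouns.foldl
    (fun acc i =>
      let now_length := PySem.Str.len i
      if ¬ (now_length = 1 ∨ now_length ≥ 4) then acc ++ [i] else acc) []
  -- new_nouns[0]: IndexError on the empty list is caught by the bare except → None
  match PySem.List.pyGet? new_nouns 0 with
  | none => none
  | some found_name₀ =>
      some (new_nouns.foldl (fun found_name i =>
        if PySem.Str.len i > PySem.Str.len found_name then i else found_name) found_name₀)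

-- ===== PORT B =====
def altGo : List String → Option String → Option String → Option String
  | [], first2, first0 => (match first2 with | some s => some s | none => first0)
  | s :: rest, first2, first0 =>
      let n := PySem.Str.len s
      if n = 3 then some s
      else altGo rest
        (if n = 2 ∧ first2 = none then some s else first2)
        (if n = 0 ∧ first0 = none then some s else first0)

def get_name_only_alt (input_nouns : List String) : Option String :=
  altGo input_nouns none none

-- ===== PRECONDITION & SPEC =====
def Spec_get_name_only (input_nouns : List String) (out : Option String) : Prop := out = get_name_only_alt input_nouns
instance (input_nouns : List String) (out : Option String) : Decidable (Spec_get_name_only input_nouns out) := by unfold Spec_get_name_only; infer_instance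

-- ===== CLAIM (what is proved, stated in full; the proofs are below) =====
def Claim_equal_get_name_only : Prop := ∀ (input_nouns : List String), Dom_get_name_only input_nouns → Spec_get_name_only input_nouns (get_name_only input_nouns)

-- ===== LEMMAS AND PROOFS =====

-- the length tests, as Bool predicates
def pvQ3 (s : String) : Bool := s.length == 3
def pvQ2 (s : String) : Bool := s.length == 2
def pvQ0 (s : String) : Bool := s.length == 0
-- A's keep condition (length not 1 and not ≥ 4)
def pvKeepB (s : String) : Bool := decide (¬ (PySem.Str.len s = 1 ∨ PySem.Str.len s ≥ 4))

theorem pvKeep_lens {s : String} (h : pvKeepB s = true) :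
    s.length = 0 ∨ s.length = 2 ∨ s.length = 3 := by
  have h' := of_decide_eq_true h
  rw [PySem.Str.len_eq] at h'
  simp only [String.length_toList] at h'
  omega

-- A's second loop picks the FIRST maximum; with lengths in {0,2,3} that is
-- the first length-3 element, else the first length-2 element, else the seed.
theorem pvAfold (l : List String) : ∀ (f : String),
    (∀ s ∈ l, s.length = 0 ∨ s.length = 2 ∨ s.length = 3) →
    (f.length = 0 ∨ f.length = 2 ∨ f.length = 3) →
    l.foldl (fun found_name i =>
        if PySem.Str.len i > PySem.Str.len found_name then i else found_name) f =
      match (f :: l).find? pvQ3 with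
      | some s => s
      | none =>
        match (f :: l).find? pvQ2 with
        | some s => s
        | none => f := by
  induction l with
  | nil =>
      intro f _ hf
      rcases hf with h | h | h <;> simp [pvQ3, pvQ2, h]
  | cons i l ih =>
      intro f hl hf
      have hi := hl i (by simp)
      have hl' : ∀ s ∈ l, s.length = 0 ∨ s.length = 2 ∨ s.length = 3 :=
        fun s hs => hl s (by simp [hs])
      simp only [List.foldl_cons]
      by_cases hgt : PySem.Str.len i > PySem.Str.len f
      · rw [if_pos hgt, ih i hl' hi]
        rw [PySem.Str.len_eq, PySem.Str.len_eq, String.length_toList, String.length_toList] at hgt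
        rcases hf with hf | hf | hf <;> rcases hi with hi | hi | hi <;>
          simp [hf, hi] at hgt ⊢ <;> simp [List.find?_cons, pvQ3, pvQ2, hf, hi]
      · rw [if_neg hgt, ih f hl' hf]
        rw [PySem.Str.len_eq, PySem.Str.len_eq, String.length_toList, String.length_toList] at hgt
        rcases hf with hf | hf | hf <;> rcases hi with hi | hi | hi <;>
          simp [hf, hi] at hgt ⊢ <;> simp [List.find?_cons, pvQ3, pvQ2, hf, hi]

-- B's loop in terms of the three first-finds
theorem pvBchar (xs : List String) : ∀ (f2 f0 : Option String),
    altGo xs f2 f0 =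
      match xs.find? pvQ3 with
      | some s => some s
      | none =>
        match (match f2 with | some t => some t | none => xs.find? pvQ2) with
        | some s => some s
        | none => (match f0 with | some t => some t | none => xs.find? pvQ0) := by
  induction xs with
  | nil => intro f2 f0; cases f2 <;> cases f0 <;> simp [altGo]
  | cons s xs ih =>
      intro f2 f0
      simp only [altGo, PySem.Str.len_eq, String.length_toList]
      by_cases h3 : (s.length : Int) = 3
      · simp [pvQ3, h3, show s.length = 3 by omega]
      · have h3' : s.length ≠ 3 := by omega
        by_cases h2 : (s.length : Int) = 2 <;>
          by_cases h0 : (s.length : Int) = 0 <;>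
          cases f2 <;> cases f0 <;>
          simp [h3, h2, h0, ih, pvQ3, pvQ2, pvQ0, h3'] <;>
          first
          | (exfalso; omega)
          | (simp [pvQ2, pvQ0, List.find?_cons, show s.length = 2 by omega])
          | (simp [pvQ2, pvQ0, List.find?_cons, show s.length = 0 by omega])
          | (simp [pvQ2, pvQ0, List.find?_cons, show s.length ≠ 2 by omega,
                   show s.length ≠ 0 by omega, show s ≠ "" by rintro rfl; simp at h0])

theorem pvFindFilter (q p : String → Bool) (himp : ∀ s, q s = true → p s = true)
    (xs : List String) : (xs.filter p).find? q = xs.find? q := by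
  induction xs with
  | nil => rfl
  | cons s xs ih =>
      by_cases hp : p s
      · by_cases hq : q s <;> simp [List.filter_cons, hp, List.find?_cons, hq, ih]
      · have hq : q s = false := by
          cases h : q s
          · rfl
          · exact absurd (himp s h) (by simp [hp])
        simp [List.filter_cons, hp, List.find?_cons, hq, ih]

theorem pvQ3_keep : ∀ s, pvQ3 s = true → pvKeepB s = true := by
  intro s h
  unfold pvQ3 at h; rw [beq_iff_eq] at h
  simp only [pvKeepB, PySem.Str.len_eq, String.length_toList, decide_eq_true_eq]
  omega
theorem pvQ2_keep : ∀ s, pvQ2 s = true → pvKeepB s = true := by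
  intro s h
  unfold pvQ2 at h; rw [beq_iff_eq] at h
  simp only [pvKeepB, PySem.Str.len_eq, String.length_toList, decide_eq_true_eq]
  omega
theorem pvQ0_keep : ∀ s, pvQ0 s = true → pvKeepB s = true := by
  intro s h
  unfold pvQ0 at h; rw [beq_iff_eq] at h
  simp only [pvKeepB, PySem.Str.len_eq, String.length_toList, decide_eq_true_eq]
  omega

-- ===== VERDICT (by name: the statement is the Claim_ definition above) =====
theorem get_name_only_spec : Claim_equal_get_name_only := by
  intro xs _
  unfold Spec_get_name_only get_name_only get_name_only_alt
  have hfold := PySem.List.foldl_append_ite_eq_filter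
    (fun i => ¬ (PySem.Str.len i = 1 ∨ PySem.Str.len i ≥ 4)) xs []
  simp only [hfold, List.nil_append]
  have hfB : (fun i => decide (¬ (PySem.Str.len i = 1 ∨ PySem.Str.len i ≥ 4))) = pvKeepB := by
    funext s; simp [pvKeepB]
  rw [hfB]
  rw [pvBchar xs none none]
  rcases hflt : xs.filter pvKeepB with _ | ⟨f, rest⟩
  · -- nothing kept: A hits IndexError → none; every find? over xs is none too
    have h3 : xs.find? pvQ3 = none := by
      rw [← pvFindFilter pvQ3 pvKeepB pvQ3_keep, hflt]; rfl
    have h2 : xs.find? pvQ2 = none := by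
      rw [← pvFindFilter pvQ2 pvKeepB pvQ2_keep, hflt]; rfl
    have h0 : xs.find? pvQ0 = none := by
      rw [← pvFindFilter pvQ0 pvKeepB pvQ0_keep, hflt]; rfl
    simp [h3, h2, h0, PySem.List.pyGet?]
  · have hmem : ∀ s ∈ f :: rest, s.length = 0 ∨ s.length = 2 ∨ s.length = 3 := by
      intro s hs
      have : pvKeepB s = true := (List.mem_filter.mp (hflt ▸ hs)).2
      exact pvKeep_lens this
    have hf := hmem f (by simp)
    have h3 : xs.find? pvQ3 = (f :: rest).find? pvQ3 := by
      rw [← pvFindFilter pvQ3 pvKeepB pvQ3_keep, hflt]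
    have h2 : xs.find? pvQ2 = (f :: rest).find? pvQ2 := by
      rw [← pvFindFilter pvQ2 pvKeepB pvQ2_keep, hflt]
    have h0 : xs.find? pvQ0 = (f :: rest).find? pvQ0 := by
      rw [← pvFindFilter pvQ0 pvKeepB pvQ0_keep, hflt]
    simp only [h3, h2, h0]
    -- A folds over the whole kept list, but the first step is a no-op
    have hstep : (f :: rest).foldl (fun found_name i =>
        if PySem.Str.len i > PySem.Str.len found_name then i else found_name) f =
        rest.foldl (fun found_name i =>
        if PySem.Str.len i > PySem.Str.len found_name then i else found_name) f := by
      simp [List.foldl_cons]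
    have hA := pvAfold rest f (fun s hs => hmem s (by simp [hs])) hf
    rw [show PySem.List.pyGet? (f :: rest) 0 = some f from by simp [PySem.List.pyGet?, PySem.List.pyIdx?]]
    simp only []
    rw [hstep, hA]
    -- compare the two three-way matches
    rcases h3' : (f :: rest).find? pvQ3 with _ | s
    · rcases h2' : (f :: rest).find? pvQ2 with _ | t
      · -- no 3, no 2: f itself has length 0, so it is the first pvQ0 hit
        have hf3 : pvQ3 f = false := by
          have := List.find?_eq_none.mp h3' f (by simp)
          simpa using this
        have hf2 : pvQ2 f = false := by
          have := List.find?_eq_none.mp h2' f (by simp)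
          simpa using this
        have hf0 : pvQ0 f = true := by
          simp [pvQ3] at hf3; simp [pvQ2] at hf2
          rcases hf with h | h | h <;> simp [pvQ0, h] <;> omega
        simp [List.find?_cons, hf0]
      · simp
    · simp
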